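-- pv_equiv track=rewrite | github.com/UserArchitAryan/ARYA-MOTO | Automobile Serivce Management System/register.py | menu_box
-- ===== SOURCE A (Python) =====
-- RED = "\033[91m"
--
-- RESET = "\033[0m"
--
-- def menu_box(text):
--     screen_width = 128
--     styled_text = ""
--     for ch in text:
--         if ch in "12345":
--             styled_text += RED + ch + RESET
--         else:
--             styled_text += ch
--     return styled_text
-- ===== SOURCE B (Python) =====
-- RED = "\033[91m"
-- RESET = "\033[0m"
--
-- def menu_box(text):
--     # Staged whole-string rewriting: one replace pass per digit instead of a
--     # per-character loop. The lowest digit is processed first so that later passes never see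
--     # that digit inside already-inserted RED markers (markers contain none of the later digits).
--     out = text
--     for d in "12345":
--         out = out.replace(d, RED + d + RESET)
--     return out
-- ===== Notes on version B (the rewrite author's own statement) =====
-- stated objective: alternative
-- what changed: Replaces A's single per-character loop (test each char, append) with five staged whole-string replace passes, one digit at a time, ordered so the lowest digit is rewritten before later passes could see that digit inside already-inserted RED markers.
import Mathlib
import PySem

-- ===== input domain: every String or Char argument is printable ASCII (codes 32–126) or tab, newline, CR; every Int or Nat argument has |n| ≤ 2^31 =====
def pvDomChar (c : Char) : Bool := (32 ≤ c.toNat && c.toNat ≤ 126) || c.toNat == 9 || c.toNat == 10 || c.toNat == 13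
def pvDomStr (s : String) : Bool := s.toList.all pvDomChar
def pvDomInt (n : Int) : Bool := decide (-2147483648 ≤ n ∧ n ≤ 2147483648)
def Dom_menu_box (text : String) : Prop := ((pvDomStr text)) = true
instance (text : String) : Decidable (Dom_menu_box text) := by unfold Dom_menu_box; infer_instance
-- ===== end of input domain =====

-- B rewrites the whole string in five staged replace passes (one digit at a time, lowest digit first
-- so later passes never touch inserted markers) instead of A's single per-character loop.

def pvRED : List Char := "\x1B[91m".toList
def pvRESET : List Char := "\x1B[0m".toList

-- ===== PORT A =====
-- the loop 'for ch in text: if ch in "12345": styled_text += RED+ch+RESET else: styled_text += ch'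
-- ('ch in "12345"' on a single character = membership among its characters, exact)
def menu_box (text : String) : String :=
  String.ofList (text.toList.foldl
    (fun styled ch =>
      if ch ∈ "12345".toList then styled ++ (pvRED ++ [ch] ++ pvRESET)
      else styled ++ [ch]) [])

-- ===== PORT B =====
-- the loop 'for d in "12345": out = out.replace(d, RED + d + RESET)'
def menu_box_alt (text : String) : String :=
  "12345".toList.foldl
    (fun out d => PySem.Str.replace out (String.ofList [d]) (String.ofList (pvRED ++ [d] ++ pvRESET)))
    text

-- ===== PRECONDITION & SPEC =====
def Spec_menu_box (text : String) (out : String) : Prop := out = menu_box_alt text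
instance (text : String) (out : String) : Decidable (Spec_menu_box text out) := by unfold Spec_menu_box; infer_instance

-- ===== CLAIM (what is proved, stated in full; the proofs are below) =====
def Claim_equal_menu_box : Prop := ∀ (text : String), Dom_menu_box text → Spec_menu_box text (menu_box text)

-- ===== LEMMAS AND PROOFS =====

-- the per-character effect of one replace pass for digit d
def pvF (d c : Char) : List Char := if c = d then pvRED ++ [d] ++ pvRESET else [c]

-- the per-character effect after processing the digits in ds
def pvG (ds : List Char) (c : Char) : List Char :=
  if c ∈ ds then pvRED ++ [c] ++ pvRESET else [c]

-- single-char replace = flatMap of pvF (go with enough fuel)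
theorem pv_go_single (d : Char) (new : List Char) :
    ∀ (fuel : Nat) (l acc : List Char), l.length ≤ fuel →
      PySem.Chars.replace.go [d] new fuel l acc =
        acc.reverse ++ l.flatMap (fun c => if c = d then new else [c]) := by
  intro fuel
  induction fuel with
  | zero =>
    intro l acc h
    have : l = [] := List.eq_nil_of_length_eq_zero (Nat.le_zero.mp h)
    subst this; simp [PySem.Chars.replace.go]
  | succ n ih =>
    intro l acc h
    cases l with
    | nil => simp [PySem.Chars.replace.go]
    | cons c t =>
      simp only [PySem.Chars.replace.go]
      have ht : t.length ≤ n := by simpa using Nat.succ_le_succ_iff.mp h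
      by_cases hc : c = d
      · subst hc
        have hpre : List.isPrefixOf [c] (c :: t) = true := by
          simp [List.isPrefixOf]
        rw [if_pos hpre, show List.drop [c].length (c :: t) = t from rfl,
          ih t (new.reverse ++ acc) ht]
        simp
      · have hpre : List.isPrefixOf [d] (c :: t) = false := by
          simp [List.isPrefixOf]; exact fun h' => hc h'.symm
        rw [if_neg (by simp [hpre])]
        rw [ih t (c :: acc) ht]
        simp [hc]

theorem pv_replace_single (d : Char) (new l : List Char) :
    PySem.Chars.replace l [d] new = l.flatMap (fun c => if c = d then new else [c]) := by
  rw [PySem.Chars.replace]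
  simp only [List.isEmpty_cons, Bool.false_eq_true, if_false]
  exact pv_go_single d new l.length l [] (le_refl _)

-- a pass for a digit not occurring in a list leaves it unchanged
theorem pv_flatMap_id (d : Char) (l : List Char) (h : ∀ x ∈ l, x ≠ d) :
    l.flatMap (pvF d) = l := by
  induction l with
  | nil => simp
  | cons a t iht =>
    have ha : a ≠ d := h a (by simp)
    simp only [List.flatMap_cons, pvF, if_neg ha]
    rw [iht (fun x hx => h x (by simp [hx]))]
    rfl

-- one replace pass on an already-partially-rewritten character: d not yet processed,
-- and d absent from the marker characters, extends the processed set by d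
theorem pv_step_point (pre : List Char) (d c : Char)
    (hdp : d ∉ pre) (hdm : d ∉ pvRED ++ pvRESET) :
    (pvG pre c).flatMap (pvF d) = pvG (pre ++ [d]) c := by
  by_cases hcp : c ∈ pre
  · have hcd : c ≠ d := fun h => hdp (h ▸ hcp)
    have hw : ∀ x ∈ pvG pre c, x ≠ d := by
      intro x hx
      simp only [pvG, if_pos hcp] at hx
      rcases (by simpa using hx : x ∈ pvRED ∨ x = c ∨ x ∈ pvRESET) with h | h | h
      · exact fun he => hdm (by simp [he ▸ h])
      · exact fun he => hcd (by rw [← h, he])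
      · exact fun he => hdm (by simp [he ▸ h])
    rw [pv_flatMap_id d _ hw]
    simp [pvG, hcp]
  · by_cases hcd : c = d
    · subst hcd
      simp [pvG, hcp, pvF]
    · simp [pvG, hcp, hcd, pvF]

-- the very first pass (nothing processed yet): no marker condition needed
theorem pv_step_nil (d c : Char) : (pvG [] c).flatMap (pvF d) = pvG [d] c := by
  by_cases hcd : c = d <;> simp [pvG, pvF, hcd]

-- one whole replace pass moves the processed set from pre to pre ++ [d]
theorem pv_pass (pre : List Char) (d : Char) (l : List Char)
    (h : ∀ c, (pvG pre c).flatMap (pvF d) = pvG (pre ++ [d]) c) :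
    PySem.Chars.replace (l.flatMap (pvG pre)) [d] (pvRED ++ [d] ++ pvRESET)
      = l.flatMap (pvG (pre ++ [d])) := by
  rw [pv_replace_single]
  show (l.flatMap (pvG pre)).flatMap (pvF d) = _
  rw [List.flatMap_assoc]
  exact List.flatMap_congr (fun c _ => h c)

-- A's accumulator loop in closed form
theorem menu_box_body (l : List Char) (acc : List Char) :
    l.foldl (fun styled ch =>
      if ch ∈ "12345".toList then styled ++ (pvRED ++ [ch] ++ pvRESET)
      else styled ++ [ch]) acc
    = acc ++ l.flatMap (pvG "12345".toList) := by
  induction l generalizing acc with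
  | nil => simp
  | cons c t ih =>
    simp only [List.foldl_cons, List.flatMap_cons, ih, pvG]
    split <;> simp

theorem pv_flatMap_nilG (l : List Char) : l = l.flatMap (pvG []) := by
  induction l with
  | nil => rfl
  | cons a t ih => simp only [List.flatMap_cons, pvG, List.not_mem_nil]; simp [← ih]

-- ===== VERDICT (by name: the statement is the Claim_ definition above) =====
theorem menu_box_spec : Claim_equal_menu_box := by
  intro text _
  unfold Spec_menu_box menu_box menu_box_alt
  rw [menu_box_body]
  simp only [show "12345".toList = ['1','2','3','4','5'] from rfl,
    List.foldl_cons, List.foldl_nil, PySem.Str.replace, String.toList_ofList]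
  congr 1
  conv_rhs => rw [show text.toList = text.toList.flatMap (pvG []) from pv_flatMap_nilG text.toList]
  rw [pv_pass [] '1' text.toList (pv_step_nil '1')]
  simp only [List.nil_append]
  rw [pv_pass ['1'] '2' text.toList (fun c => pv_step_point _ _ c (by decide) (by decide))]
  simp only [List.cons_append, List.nil_append]
  rw [pv_pass ['1','2'] '3' text.toList (fun c => pv_step_point _ _ c (by decide) (by decide))]
  simp only [List.cons_append, List.nil_append]
  rw [pv_pass ['1','2','3'] '4' text.toList (fun c => pv_step_point _ _ c (by decide) (by decide))]
  simp only [List.cons_append, List.nil_append]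
  rw [pv_pass ['1','2','3','4'] '5' text.toList (fun c => pv_step_point _ _ c (by decide) (by decide))]
  simp only [List.cons_append, List.nil_append]
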